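-- pv_equiv track=rewrite | github.com/krystianbajno/encode-tools | encoder.py | math_unicode_double_struck_encode
-- ===== SOURCE A (Python) =====
-- def math_unicode_double_struck_encode(s):
--     """Mathematical Double-Struck Unicode"""
--     # Double-struck uppercase: U+1D538-U+1D551, lowercase: U+1D552-U+1D56B
--     result = ''
--     for c in s:
--         if 'A' <= c <= 'Z':
--             result += chr(0x1D538 + (ord(c) - ord('A')))
--         elif 'a' <= c <= 'z':
--             result += chr(0x1D552 + (ord(c) - ord('a')))
--         else:
--             result += c
--     return result
-- ===== SOURCE B (Python) =====
-- def math_unicode_double_struck_encode(s):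
--     """Mathematical Double-Struck Unicode"""
--     table = {}
--     for i in range(26):
--         table[ord('A') + i] = chr(0x1D538 + i)
--         table[ord('a') + i] = chr(0x1D552 + i)
--     return s.translate(table)
-- ===== Notes on version B (the rewrite author's own statement) =====
-- stated objective: idiomatic
-- what changed: Replaces the per-character three-branch if/elif chain with a precomputed 52-entry translation table (ord(c) -> double-struck char) applied via str.translate, removing the explicit branching loop and string concatenation.
import Mathlib
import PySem

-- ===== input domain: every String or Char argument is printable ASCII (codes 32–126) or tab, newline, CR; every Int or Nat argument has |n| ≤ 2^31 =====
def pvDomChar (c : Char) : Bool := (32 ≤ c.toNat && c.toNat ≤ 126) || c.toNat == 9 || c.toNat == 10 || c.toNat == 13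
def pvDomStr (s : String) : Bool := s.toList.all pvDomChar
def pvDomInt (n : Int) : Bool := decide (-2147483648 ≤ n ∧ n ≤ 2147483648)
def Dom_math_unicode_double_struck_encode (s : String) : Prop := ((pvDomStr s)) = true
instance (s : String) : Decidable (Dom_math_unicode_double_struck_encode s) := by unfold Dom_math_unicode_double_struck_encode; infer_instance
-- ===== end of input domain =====

set_option maxRecDepth 4000


-- B replaces A's per-character if/elif chain with a precomputed translation table applied to every
-- character (idiomatic str.translate style); same O(n) cost, proved to return the same string.

-- ===== PORT A =====
-- per-character body of A's loop (the three branches, in order)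
def pvStepA (c : Char) : String :=
  if 'A' ≤ c ∧ c ≤ 'Z' then String.singleton (Char.ofNat (0x1D538 + (c.toNat - 'A'.toNat)))
  else if 'a' ≤ c ∧ c ≤ 'z' then String.singleton (Char.ofNat (0x1D552 + (c.toNat - 'a'.toNat)))
  else String.singleton c

def math_unicode_double_struck_encode (s : String) : String :=
  s.toList.foldl (fun result c => result ++ pvStepA c) ""

-- ===== PORT B =====
-- table = {} ; for i in range(26): table[ord('A')+i] = chr(0x1D538+i); table[ord('a')+i] = chr(0x1D552+i)
def pvTable : PySem.Dict Int String :=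
  (PySem.List.pyRange 0 26 1).foldl
    (fun d i =>
      (d.insert (65 + i) (String.singleton (Char.ofNat (0x1D538 + i.toNat)))).insert
        (97 + i) (String.singleton (Char.ofNat (0x1D552 + i.toNat))))
    PySem.Dict.empty

-- s.translate(table): each character is replaced by table[ord(c)] if present, else kept (exact for
-- a table whose values are single-character strings, as here)
def math_unicode_double_struck_encode_alt (s : String) : String :=
  String.join (s.toList.map fun c => (pvTable.get? (c.toNat : Int)).getD (String.singleton c))

-- ===== PRECONDITION & SPEC =====
def Spec_math_unicode_double_struck_encode (s : String) (out : String) : Prop := out = math_unicode_double_struck_encode_alt s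
instance (s : String) (out : String) : Decidable (Spec_math_unicode_double_struck_encode s out) := by unfold Spec_math_unicode_double_struck_encode; infer_instance

-- ===== CLAIM (what is proved, stated in full; the proofs are below) =====
def Claim_equal_math_unicode_double_struck_encode : Prop := ∀ (s : String), Dom_math_unicode_double_struck_encode s → Spec_math_unicode_double_struck_encode s (math_unicode_double_struck_encode s)

-- ===== LEMMAS AND PROOFS =====

-- B's per-character result, for comparing with pvStepA
def pvStepB (c : Char) : String := (pvTable.get? (c.toNat : Int)).getD (String.singleton c)

-- the two per-character functions agree on every domain character
theorem pvStep_eq (c : Char) (h : pvDomChar c = true) : pvStepA c = pvStepB c := by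
  have hle : c.toNat < 127 := by
    simp [pvDomChar] at h
    omega
  have key : ∀ n : Nat, n < 127 → pvStepA (Char.ofNat n) = pvStepB (Char.ofNat n) := by decide
  have hc : Char.ofNat c.toNat = c := Char.ofNat_toNat c
  simpa [hc] using key c.toNat hle

theorem foldl_str_shift (l : List String) : ∀ a : String,
    l.foldl (fun r s => r ++ s) a = a ++ l.foldl (fun r s => r ++ s) "" := by
  induction l with
  | nil => intro a; simp
  | cons x t ih =>
      intro a
      show List.foldl (fun r s => r ++ s) (a ++ x) t
          = a ++ List.foldl (fun r s => r ++ s) ("" ++ x) t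
      rw [ih (a ++ x), ih ("" ++ x)]
      simp [String.append_assoc]

theorem foldl_app (g : Char → String) (l : List Char) : ∀ acc : String,
    l.foldl (fun r c => r ++ g c) acc = acc ++ String.join (l.map g) := by
  induction l with
  | nil => intro acc; simp [String.join]
  | cons c t ih =>
      intro acc
      show List.foldl (fun r c => r ++ g c) (acc ++ g c) t
          = acc ++ List.foldl (fun r s => r ++ s) ("" ++ g c) (List.map g t)
      rw [ih (acc ++ g c), foldl_str_shift (t.map g) ("" ++ g c)]
      simp [String.join, String.append_assoc]

-- ===== VERDICT (by name: the statement is the Claim_ definition above) =====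
theorem math_unicode_double_struck_encode_spec : Claim_equal_math_unicode_double_struck_encode := by
  intro s hdom
  unfold Spec_math_unicode_double_struck_encode math_unicode_double_struck_encode math_unicode_double_struck_encode_alt
  rw [foldl_app pvStepA s.toList ""]
  have hall : ∀ c ∈ s.toList, pvDomChar c = true := by
    simpa [Dom_math_unicode_double_struck_encode, pvDomStr, List.all_eq_true] using hdom
  have : s.toList.map pvStepA = s.toList.map (fun c => (pvTable.get? (c.toNat : Int)).getD (String.singleton c)) := by
    apply List.map_congr_left
    intro c hc
    simpa [pvStepB] using pvStep_eq c (hall c hc)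
  simp [this]
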